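-- pv_equiv track=rewrite | github.com/NMBawiskar/Algorithms_from_scratch | HOG_features_and_classifier/main.py | quantize_unsigned
-- ===== SOURCE A (Python) =====
-- def quantize_unsigned(angle):
--     """quantization of unsigned angles"""
--     #### Subtract 180 if angle is within range [180,360)
--     if angle > 180:
--         angle = angle - 180
--     upperMargins = [20,40,60,80,100,120,140,160,180]
--     bin_index = 8
--     for i, upper in enumerate(upperMargins):
--         if angle <upper:
--             bin_index = i
--             break
--     return bin_index
-- ===== SOURCE B (Python) =====
-- def quantize_unsigned(angle):
--     """quantization of unsigned angles"""
--     if angle > 180: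
--         angle = angle - 180
--     return max(0, min(angle // 20, 8))
-- ===== Notes on version B (the rewrite author's own statement) =====
-- stated objective: simpler
-- what changed: Replaced the margin list and its linear scan loop with a single clamped floor-division formula.
import Mathlib
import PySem

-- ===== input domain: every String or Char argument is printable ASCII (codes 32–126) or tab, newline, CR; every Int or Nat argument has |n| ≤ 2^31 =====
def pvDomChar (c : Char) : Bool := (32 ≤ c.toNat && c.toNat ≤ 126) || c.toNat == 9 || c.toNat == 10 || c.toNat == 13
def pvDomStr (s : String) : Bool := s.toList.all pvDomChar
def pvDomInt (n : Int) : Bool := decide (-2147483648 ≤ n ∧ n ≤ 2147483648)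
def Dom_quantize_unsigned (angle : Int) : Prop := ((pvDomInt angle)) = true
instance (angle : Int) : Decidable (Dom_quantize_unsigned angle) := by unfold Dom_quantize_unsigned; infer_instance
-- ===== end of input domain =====

-- B replaces A's margin-list scan by one clamped floor-division formula (simpler, same values).

-- ===== PORT A =====
-- A's for-loop with break: first i with angle < upperMargins[i], else the initial bin_index 8.
def quantize_unsigned_loop (angle : Int) : List (Int × Int) → Int
  | [] => 8
  | (i, upper) :: rest => if angle < upper then i else quantize_unsigned_loop angle rest

def quantize_unsigned (angle : Int) : Int :=
  let angle := if angle > 180 then angle - 180 else angle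
  let upperMargins : List Int := [20, 40, 60, 80, 100, 120, 140, 160, 180]
  quantize_unsigned_loop angle (PySem.List.enumerate upperMargins)

-- ===== PORT B =====
def quantize_unsigned_alt (angle : Int) : Int :=
  let angle := if angle > 180 then angle - 180 else angle
  max 0 (min (PySem.Int.floordiv angle 20) 8)

-- ===== PRECONDITION & SPEC =====
def Spec_quantize_unsigned (angle : Int) (out : Int) : Prop := out = quantize_unsigned_alt angle
instance (angle : Int) (out : Int) : Decidable (Spec_quantize_unsigned angle out) := by unfold Spec_quantize_unsigned; infer_instance

-- ===== CLAIM (what is proved, stated in full; the proofs are below) =====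
def Claim_equal_quantize_unsigned : Prop := ∀ (angle : Int), Dom_quantize_unsigned angle → Spec_quantize_unsigned angle (quantize_unsigned angle)

-- ===== LEMMAS AND PROOFS =====
theorem quantize_unsigned_core (a : Int) :
    quantize_unsigned_loop a (PySem.List.enumerate [20, 40, 60, 80, 100, 120, 140, 160, 180])
      = max 0 (min (PySem.Int.floordiv a 20) 8) := by
  rw [PySem.Int.floordiv_eq_ediv_of_pos (by norm_num : (0:Int) < 20)]
  simp only [PySem.List.enumerate, quantize_unsigned_loop]
  split_ifs <;> omega

-- ===== VERDICT (by name: the statement is the Claim_ definition above) =====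
theorem quantize_unsigned_spec : Claim_equal_quantize_unsigned := by
  intro angle _
  unfold Spec_quantize_unsigned quantize_unsigned quantize_unsigned_alt
  simp only []
  exact quantize_unsigned_core _
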